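-- pv_equiv track=rewrite | github.com/sgm1018/GitLLMTrainer | src/utils/helpers.py | is_valid_file
-- ===== SOURCE A (Python) =====
-- def is_valid_file(file_path : str):
--     """Check if a file path is valid."""
--     valid_extensions = [
--         '.py', '.java', '.c', '.cpp', '.cs', '.js', '.ts', '.rb', '.go', '.rs', '.php', '.html', '.css', '.xml',
--         '.json', '.yaml', '.yml', '.md', '.txt', '.sh', '.bat', '.pl', '.swift', '.kt', '.scala', '.r', '.m',
--         '.vb', '.vbs', '.lua', '.sql', '.asm', '.s', '.dart', '.erl', '.ex', '.exs', '.hs', '.jl', '.lisp',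
--         '.clj', '.cljs', '.groovy', '.f', '.f90', '.f95', '.ada', '.d', '.pas', '.pro', '.tcl', '.v', '.sv',
--         '.vhdl', '.hdl', '.m', '.mat', '.sas', '.r', '.rmd', '.tex', '.bib', '.rst', '.org', '.ipynb', '.tsx',
--         '.jsx', '.tsx', '.vue', '.scss', '.less', '.coffee', '.h', '.hpp', '.hh', '.hxx', '.ino', '.pde', '.ino',
--         '.pde', '.rkt', '.scm', '.ss', '.cl', '.ml', '.mli', '.mll', '.mly', '.sml', '.sig', '.fun']
--     return any(file_path.lower().endswith(ext) for ext in valid_extensions)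
-- ===== SOURCE B (Python) =====
-- VALID_EXTENSIONS = frozenset([
--     '.py', '.java', '.c', '.cpp', '.cs', '.js', '.ts', '.rb', '.go', '.rs',
--     '.php', '.html', '.css', '.xml', '.json', '.yaml', '.yml', '.md', '.txt',
--     '.sh', '.bat', '.pl', '.swift', '.kt', '.scala', '.r', '.m', '.vb',
--     '.vbs', '.lua', '.sql', '.asm', '.s', '.dart', '.erl', '.ex', '.exs',
--     '.hs', '.jl', '.lisp', '.clj', '.cljs', '.groovy', '.f', '.f90', '.f95',
--     '.ada', '.d', '.pas', '.pro', '.tcl', '.v', '.sv', '.vhdl', '.hdl',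
--     '.mat', '.sas', '.rmd', '.tex', '.bib', '.rst', '.org', '.ipynb', '.tsx',
--     '.jsx', '.vue', '.scss', '.less', '.coffee', '.h', '.hpp', '.hh', '.hxx',
--     '.ino', '.pde', '.rkt', '.scm', '.ss', '.cl', '.ml', '.mli', '.mll',
--     '.mly', '.sml', '.sig', '.fun'])
--
--
-- def is_valid_file(file_path: str):
--     """Check if a file path is valid (has a recognised source-file extension)."""
--     lowered = file_path.lower()
--     idx = lowered.rfind('.')
--     return idx != -1 and lowered[idx:] in VALID_EXTENSIONS
-- ===== Notes on version B (the rewrite author's own statement) =====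
-- stated objective: faster
-- what changed: Instead of scanning every extension with endswith on the lowered path, B finds the last dot with rfind once and does a single frozenset membership test on the suffix from that dot.
import Mathlib
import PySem

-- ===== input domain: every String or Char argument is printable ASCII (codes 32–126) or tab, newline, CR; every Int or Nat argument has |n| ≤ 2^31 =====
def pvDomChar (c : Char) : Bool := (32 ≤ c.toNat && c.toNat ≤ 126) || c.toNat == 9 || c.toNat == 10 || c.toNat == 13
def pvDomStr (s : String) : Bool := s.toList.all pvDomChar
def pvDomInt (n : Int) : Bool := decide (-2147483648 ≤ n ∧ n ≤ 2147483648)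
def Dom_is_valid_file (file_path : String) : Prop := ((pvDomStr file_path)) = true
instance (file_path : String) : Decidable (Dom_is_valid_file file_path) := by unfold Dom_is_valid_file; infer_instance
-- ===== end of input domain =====

-- B replaces A's per-extension endswith scan by rfind of the last dot plus one set lookup
-- on the suffix (return value identical).
-- ===== PORT A =====
-- A's valid_extensions list (duplicates included, as in the source)
def pvExts : List (List Char) := [
  ['.', 'p', 'y'],
  ['.', 'j', 'a', 'v', 'a'],
  ['.', 'c'],
  ['.', 'c', 'p', 'p'],
  ['.', 'c', 's'],
  ['.', 'j', 's'],
  ['.', 't', 's'],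
  ['.', 'r', 'b'],
  ['.', 'g', 'o'],
  ['.', 'r', 's'],
  ['.', 'p', 'h', 'p'],
  ['.', 'h', 't', 'm', 'l'],
  ['.', 'c', 's', 's'],
  ['.', 'x', 'm', 'l'],
  ['.', 'j', 's', 'o', 'n'],
  ['.', 'y', 'a', 'm', 'l'],
  ['.', 'y', 'm', 'l'],
  ['.', 'm', 'd'],
  ['.', 't', 'x', 't'],
  ['.', 's', 'h'],
  ['.', 'b', 'a', 't'],
  ['.', 'p', 'l'],
  ['.', 's', 'w', 'i', 'f', 't'],
  ['.', 'k', 't'],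
  ['.', 's', 'c', 'a', 'l', 'a'],
  ['.', 'r'],
  ['.', 'm'],
  ['.', 'v', 'b'],
  ['.', 'v', 'b', 's'],
  ['.', 'l', 'u', 'a'],
  ['.', 's', 'q', 'l'],
  ['.', 'a', 's', 'm'],
  ['.', 's'],
  ['.', 'd', 'a', 'r', 't'],
  ['.', 'e', 'r', 'l'],
  ['.', 'e', 'x'],
  ['.', 'e', 'x', 's'],
  ['.', 'h', 's'],
  ['.', 'j', 'l'],
  ['.', 'l', 'i', 's', 'p'],
  ['.', 'c', 'l', 'j'],
  ['.', 'c', 'l', 'j', 's'],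
  ['.', 'g', 'r', 'o', 'o', 'v', 'y'],
  ['.', 'f'],
  ['.', 'f', '9', '0'],
  ['.', 'f', '9', '5'],
  ['.', 'a', 'd', 'a'],
  ['.', 'd'],
  ['.', 'p', 'a', 's'],
  ['.', 'p', 'r', 'o'],
  ['.', 't', 'c', 'l'],
  ['.', 'v'],
  ['.', 's', 'v'],
  ['.', 'v', 'h', 'd', 'l'],
  ['.', 'h', 'd', 'l'],
  ['.', 'm'],
  ['.', 'm', 'a', 't'],
  ['.', 's', 'a', 's'],
  ['.', 'r'],
  ['.', 'r', 'm', 'd'],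
  ['.', 't', 'e', 'x'],
  ['.', 'b', 'i', 'b'],
  ['.', 'r', 's', 't'],
  ['.', 'o', 'r', 'g'],
  ['.', 'i', 'p', 'y', 'n', 'b'],
  ['.', 't', 's', 'x'],
  ['.', 'j', 's', 'x'],
  ['.', 't', 's', 'x'],
  ['.', 'v', 'u', 'e'],
  ['.', 's', 'c', 's', 's'],
  ['.', 'l', 'e', 's', 's'],
  ['.', 'c', 'o', 'f', 'f', 'e', 'e'],
  ['.', 'h'],
  ['.', 'h', 'p', 'p'],
  ['.', 'h', 'h'],
  ['.', 'h', 'x', 'x'],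
  ['.', 'i', 'n', 'o'],
  ['.', 'p', 'd', 'e'],
  ['.', 'i', 'n', 'o'],
  ['.', 'p', 'd', 'e'],
  ['.', 'r', 'k', 't'],
  ['.', 's', 'c', 'm'],
  ['.', 's', 's'],
  ['.', 'c', 'l'],
  ['.', 'm', 'l'],
  ['.', 'm', 'l', 'i'],
  ['.', 'm', 'l', 'l'],
  ['.', 'm', 'l', 'y'],
  ['.', 's', 'm', 'l'],
  ['.', 's', 'i', 'g'],
  ['.', 'f', 'u', 'n']
]

def is_valid_file (file_path : String) : Bool :=
  let l := PySem.Chars.lower file_path.toList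
  pvExts.any (fun ext => PySem.Chars.endswith l ext)

-- ===== PORT B =====
-- Source B's VALID_EXTENSIONS frozenset (distinct string literals; Python str -> List Char,
-- so each literal is written as a String and converted)
def pvExtStrs : List String := [
  ".py", ".java", ".c", ".cpp", ".cs", ".js", ".ts", ".rb", ".go", ".rs",
  ".php", ".html", ".css", ".xml", ".json", ".yaml", ".yml", ".md", ".txt",
  ".sh", ".bat", ".pl", ".swift", ".kt", ".scala", ".r", ".m", ".vb",
  ".vbs", ".lua", ".sql", ".asm", ".s", ".dart", ".erl", ".ex", ".exs",
  ".hs", ".jl", ".lisp", ".clj", ".cljs", ".groovy", ".f", ".f90", ".f95",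
  ".ada", ".d", ".pas", ".pro", ".tcl", ".v", ".sv", ".vhdl", ".hdl",
  ".mat", ".sas", ".rmd", ".tex", ".bib", ".rst", ".org", ".ipynb", ".tsx",
  ".jsx", ".vue", ".scss", ".less", ".coffee", ".h", ".hpp", ".hh", ".hxx",
  ".ino", ".pde", ".rkt", ".scm", ".ss", ".cl", ".ml", ".mli", ".mll",
  ".mly", ".sml", ".sig", ".fun"]

def pvExtSet : PySem.Set (List Char) := PySem.Set.ofList (pvExtStrs.map String.toList)

def is_valid_file_alt (file_path : String) : Bool :=
  let lowered := PySem.Chars.lower file_path.toList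
  let idx := PySem.Chars.rfind lowered ['.']
  if idx = -1 then false
  else pvExtSet.contains (PySem.Chars.slice lowered (some idx) none)

-- ===== PRECONDITION & SPEC =====
def Spec_is_valid_file (file_path : String) (out : Bool) : Prop := out = is_valid_file_alt file_path
instance (file_path : String) (out : Bool) : Decidable (Spec_is_valid_file file_path out) := by unfold Spec_is_valid_file; infer_instance

-- ===== CLAIM (what is proved, stated in full; the proofs are below) =====
def Claim_equal_is_valid_file : Prop := ∀ (file_path : String), Dom_is_valid_file file_path → Spec_is_valid_file file_path (is_valid_file file_path)

-- ===== LEMMAS AND PROOFS =====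

-- every extension in A's list starts with '.' and has no further dot
lemma pvExts_prop : ∀ e ∈ pvExts, e.head? = some '.' ∧ '.' ∉ e.tail := by decide

-- B's frozenset is exactly the ordered dedup of A's list
set_option maxRecDepth 20000 in
lemma pvExtSet_eq : pvExtSet = PySem.Set.ofList pvExts := by decide

lemma mem_pvExtSet (e : List Char) : e ∈ pvExtSet ↔ e ∈ pvExts := by
  rw [pvExtSet_eq]; exact PySem.Set.mem_ofList pvExts e

-- characterisation of rfind.go: either no occurrence up to k, or the greatest one
lemma rgo_cases (s sub : List Char) (k : Nat) :
    (PySem.Chars.rfind.go s sub k = -1 ∧ ∀ i ≤ k, ¬ sub <+: s.drop i) ∨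
    (∃ j : Nat, PySem.Chars.rfind.go s sub k = (j : Int) ∧ j ≤ k ∧ sub <+: s.drop j ∧
      ∀ i, j < i → i ≤ k → ¬ sub <+: s.drop i) := by
  induction k with
  | zero =>
    by_cases h : sub.isPrefixOf s
    · right
      exact ⟨0, by simp [PySem.Chars.rfind.go, h], le_refl 0,
        by simpa [List.isPrefixOf_iff_prefix] using h, fun i hi hle => absurd (lt_of_lt_of_le hi hle) (lt_irrefl 0)⟩
    · left
      refine ⟨by simp [PySem.Chars.rfind.go, h], fun i hi => ?_⟩
      interval_cases i
      simpa [List.isPrefixOf_iff_prefix] using h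
  | succ j ih =>
    by_cases h : sub.isPrefixOf (s.drop (j + 1))
    · right
      exact ⟨j + 1, by simp [PySem.Chars.rfind.go, h], le_refl _,
        by simpa [List.isPrefixOf_iff_prefix] using h,
        fun i hi hle => absurd (lt_of_lt_of_le hi hle) (lt_irrefl _)⟩
    · have hgo : PySem.Chars.rfind.go s sub (j + 1) = PySem.Chars.rfind.go s sub j := by
        simp [PySem.Chars.rfind.go, h]
      have hnp : ¬ sub <+: s.drop (j + 1) := by
        simpa [List.isPrefixOf_iff_prefix] using h
      rcases ih with ⟨h1, h2⟩ | ⟨m, h1, h2, h3, h4⟩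
      · left
        refine ⟨hgo ▸ h1, fun i hi => ?_⟩
        rcases Nat.lt_or_ge i (j + 1) with hi' | hi'
        · exact h2 i (Nat.lt_succ_iff.mp hi')
        · have : i = j + 1 := le_antisymm hi hi'
          exact this ▸ hnp
      · right
        refine ⟨m, hgo ▸ h1, Nat.le_succ_of_le h2, h3, fun i hmi hi => ?_⟩
        rcases Nat.lt_or_ge i (j + 1) with hi' | hi'
        · exact h4 i hmi (Nat.lt_succ_iff.mp hi')
        · have : i = j + 1 := le_antisymm hi hi'
          exact this ▸ hnp

-- singleton prefix of a drop = the character at that index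
lemma dot_prefix_iff (s : List Char) (i : Nat) : ['.'] <+: s.drop i ↔ s[i]? = some '.' := by
  rw [← List.head?_drop]
  cases h : s.drop i with
  | nil => simp
  | cons x xs => constructor
                 · intro hp
                   obtain ⟨t, ht⟩ := hp
                   simp only [List.singleton_append, List.cons.injEq] at ht
                   simp [ht.1.symm]
                 · intro hh; simp at hh; exact ⟨xs, by simp [hh]⟩

-- two suffixes of the same list are comparable
lemma suffix_total {a b c : List Char} (h1 : a <:+ c) (h2 : b <:+ c) :
    a <:+ b ∨ b <:+ a := by
  rw [← List.reverse_prefix] at h1 h2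
  rcases List.prefix_or_prefix_of_prefix h1 h2 with h | h
  · left; rwa [← List.reverse_prefix]
  · right; rwa [← List.reverse_prefix]

lemma suffix_tail_of_ne {e s : List Char} (h : e <:+ s) (hne : e ≠ s) : e <:+ s.tail := by
  obtain ⟨u, rfl⟩ := h
  cases u with
  | nil => simp at hne
  | cons x xs => exact ⟨xs, by simp⟩

lemma head_mem {e : List Char} (h : e.head? = some '.') : '.' ∈ e := by
  cases e with
  | nil => simp at h
  | cons x xs => simp at h; simp [h]

-- uniqueness: a list has at most one suffix that starts with '.' and has no later dot
lemma ext_suffix_unique {l e f : List Char}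
    (he : e <:+ l) (he1 : e.head? = some '.') (he2 : '.' ∉ e.tail)
    (hf : f <:+ l) (hf1 : f.head? = some '.') (hf2 : '.' ∉ f.tail) : e = f := by
  rcases suffix_total he hf with h | h
  · by_cases heq : e = f
    · exact heq
    · exact absurd ((suffix_tail_of_ne h heq).mem (head_mem he1)) hf2
  · by_cases heq : f = e
    · exact heq.symm
    · exact absurd ((suffix_tail_of_ne h heq).mem (head_mem hf1)) he2

-- the suffix of l starting at the LAST dot: it starts with '.' and has no later dot
lemma drop_last_dot (l : List Char) (j : Nat) (hj : l[j]? = some '.')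
    (hmax : ∀ i, j < i → i ≤ l.length → ¬ ['.'] <+: l.drop i) :
    (l.drop j).head? = some '.' ∧ '.' ∉ (l.drop j).tail ∧ l.drop j <:+ l := by
  refine ⟨by rw [List.head?_drop]; exact hj, ?_, List.drop_suffix j l⟩
  rw [List.tail_drop]
  intro hmem
  obtain ⟨m, hm, hval⟩ := List.getElem_of_mem hmem
  have hidx : l[j + 1 + m]? = some '.' := by
    rw [← List.getElem?_drop, List.getElem?_eq_getElem hm, hval]
  have hlen : j + 1 + m < l.length := (List.getElem?_eq_some_iff.mp hidx).1
  exact hmax (j + 1 + m) (by omega) (by omega) ((dot_prefix_iff l _).mpr hidx)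

-- ===== VERDICT (by name: the statement is the Claim_ definition above) =====
theorem is_valid_file_spec : Claim_equal_is_valid_file := by
  intro fp _
  simp only [Spec_is_valid_file, is_valid_file, is_valid_file_alt, PySem.Chars.rfind]
  set l := PySem.Chars.lower fp.toList with hl
  rcases rgo_cases l ['.'] l.length with ⟨h1, h2⟩ | ⟨j, h1, h2, h3, h4⟩
  · -- no dot anywhere: both sides false
    rw [h1]
    simp only [reduceIte]
    simp only [List.any_eq_false]
    intro e he hend
    obtain ⟨he1, he2⟩ := pvExts_prop e he
    have hsuf := (PySem.Chars.endswith_iff l e).mp hend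
    have hdot : '.' ∈ l := hsuf.mem (head_mem he1)
    obtain ⟨i, hi, hval⟩ := List.getElem_of_mem hdot
    exact h2 i (by omega) ((dot_prefix_iff l i).mpr (by rw [List.getElem?_eq_getElem hi, hval]))
  · -- last dot at index j: A's scan can only find the suffix l.drop j
    have hj : l[j]? = some '.' := (dot_prefix_iff l j).mp h3
    obtain ⟨hh, ht, hs⟩ := drop_last_dot l j hj h4
    have hjne : (j : Int) ≠ -1 := by omega
    rw [h1, if_neg hjne]
    have hslice : PySem.Chars.slice l (some (j : Int)) none = l.drop j := by
      rw [PySem.Chars.slice_eq_listSlice, PySem.List.slice_from_natCast]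
    rw [hslice]
    by_cases hmem : l.drop j ∈ pvExts
    · have hend : PySem.Chars.endswith l (l.drop j) = true :=
        (PySem.Chars.endswith_iff _ _).mpr hs
      have hc : pvExtSet.contains (l.drop j) = true :=
        (PySem.Set.contains_iff _ _).mpr ((mem_pvExtSet _).mpr hmem)
      rw [hc]
      exact List.any_eq_true.mpr ⟨_, hmem, hend⟩
    · have hc : pvExtSet.contains (l.drop j) = false := by
        rw [Bool.eq_false_iff]
        intro h
        exact hmem ((mem_pvExtSet _).mp ((PySem.Set.contains_iff _ _).mp h))
      rw [hc]
      simp only [List.any_eq_false]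
      intro e he hend
      obtain ⟨he1, he2⟩ := pvExts_prop e he
      have hsuf := (PySem.Chars.endswith_iff l e).mp hend
      exact hmem (ext_suffix_unique hsuf he1 he2 hs hh ht ▸ he)
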